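-- pv_equiv track=rewrite | github.com/cdeide/Machine-Learning-Classification | mysklearn/myutils.py | split_stratified_data
-- ===== SOURCE A (Python) =====
-- def split_stratified_data(n_splits, group_indices):
--     """
--     Function splits the stratified dataset as evenly as possible into n partitions
--     Differs from split_data as the original dataset has already been split into
--     groups based on classification
--
--     Args:
--         n_splits (int): number of partitions to split data into
--         group_indices (list of list): each row in this 2D list is a list of all of the
--         indexes with corresponding attributes
--
--     Returns:
--         list of list: A 2D list with lists of stratified split data from X
--     """
--
--     splits = []
--     for _ in range(n_splits):
--         splits.append([])
--     idx = 0
--     for group in group_indices: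
--         for i in range(len(group)):
--             splits[idx].append(group[i])
--             # Check for looping back around
--             if idx == n_splits - 1:
--                 idx = 0
--             else:
--                 idx += 1
--
--     return splits
-- ===== SOURCE B (Python) =====
-- def split_stratified_data(n_splits, group_indices):
--     # Flatten the groups in order; the element at global position p goes to
--     # partition p % n_splits, so each partition is a positional filter.
--     flat = [x for group in group_indices for x in group]
--     return [[x for p, x in enumerate(flat) if p % n_splits == i]
--             for i in range(n_splits)]
-- ===== Notes on version B (the rewrite author's own statement) =====
-- stated objective: simpler
-- what changed: Replaces the stateful round-robin counter over preallocated buckets by flattening the groups once and building each partition directly as the elements whose global position is congruent to the partition index mod n_splits.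
import Mathlib
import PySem

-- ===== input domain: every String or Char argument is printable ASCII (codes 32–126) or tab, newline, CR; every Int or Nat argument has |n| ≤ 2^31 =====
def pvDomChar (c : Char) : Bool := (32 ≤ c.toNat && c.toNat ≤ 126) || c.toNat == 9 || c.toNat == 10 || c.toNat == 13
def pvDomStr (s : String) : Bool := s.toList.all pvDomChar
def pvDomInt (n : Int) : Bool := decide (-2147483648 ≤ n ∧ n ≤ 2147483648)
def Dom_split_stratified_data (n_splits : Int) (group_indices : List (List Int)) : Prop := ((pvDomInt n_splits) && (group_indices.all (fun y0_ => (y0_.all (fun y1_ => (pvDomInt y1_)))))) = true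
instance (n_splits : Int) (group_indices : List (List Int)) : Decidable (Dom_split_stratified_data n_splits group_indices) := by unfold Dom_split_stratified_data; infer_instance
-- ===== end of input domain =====

-- B flattens the groups once and builds each partition as a positional filter (index mod n_splits),
-- instead of A's stateful round-robin counter over preallocated buckets; objective: simpler.

-- ===== PORT A =====
-- splits[idx].append(...) is ported as List.modify at idx.toNat; under Pre_ idx stays in [0, n_splits),
-- exactly the indices where Python's splits[idx] succeeds. group[i] with i ∈ range(len(group)) is pyGetD
-- (the default is never read: i is always in range).
def split_stratified_data (n_splits : Int) (group_indices : List (List Int)) : List (List Int) :=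
  let splits := (PySem.List.pyRange 0 n_splits).foldl (fun s _ => s ++ [([] : List Int)]) []
  let st := group_indices.foldl (fun (st : List (List Int) × Int) group =>
      (PySem.List.pyRange 0 (PySem.List.len group)).foldl (fun st i =>
        (st.1.modify st.2.toNat (fun l => l ++ [PySem.List.pyGetD group i 0]),
         if st.2 = n_splits - 1 then 0 else st.2 + 1)) st)
    (splits, 0)
  st.1

-- ===== PORT B =====
def split_stratified_data_alt (n_splits : Int) (group_indices : List (List Int)) : List (List Int) :=
  let flat := group_indices.flatMap (fun group => group)
  (PySem.List.pyRange 0 n_splits).map (fun i =>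
    (PySem.List.enumerate flat).filterMap (fun px =>
      if PySem.Int.mod px.1 n_splits = i then some px.2 else none))

-- ===== PRECONDITION & SPEC =====
-- Pre_ excludes exactly the inputs where A raises IndexError: n_splits <= 0 together with a non-empty group.
def Pre_split_stratified_data (n_splits : Int) (group_indices : List (List Int)) : Prop :=
  1 ≤ n_splits ∨ ∀ g ∈ group_indices, g = []
instance (n_splits : Int) (group_indices : List (List Int)) : Decidable (Pre_split_stratified_data n_splits group_indices) := by unfold Pre_split_stratified_data; infer_instance
def pvWitness_split_stratified_data : Int × List (List Int) := (3, [[1, 2], [3, 4, 5]])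

def Spec_split_stratified_data (n_splits : Int) (group_indices : List (List Int)) (out : List (List Int)) : Prop := out = split_stratified_data_alt n_splits group_indices
instance (n_splits : Int) (group_indices : List (List Int)) (out : List (List Int)) : Decidable (Spec_split_stratified_data n_splits group_indices out) := by unfold Spec_split_stratified_data; infer_instance

-- ===== CLAIM (what is proved, stated in full; the proofs are below) =====
def Claim_equal_split_stratified_data : Prop := ∀ (n_splits : Int) (group_indices : List (List Int)), Dom_split_stratified_data n_splits group_indices → Pre_split_stratified_data n_splits group_indices → Spec_split_stratified_data n_splits group_indices (split_stratified_data n_splits group_indices)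

-- ===== LEMMAS AND PROOFS =====

-- A's per-element state update, named for the proofs.
def stepA (n : Int) (st : List (List Int) × Int) (x : Int) : List (List Int) × Int :=
  (st.1.modify st.2.toNat (fun l => l ++ [x]), if st.2 = n - 1 then 0 else st.2 + 1)

-- pick n j k flat: the elements of flat collected into bucket j by a round-robin counter starting at k.
def pick (n j : Nat) : Nat → List Int → List Int
  | _, [] => []
  | k, x :: xs => (if k = j then [x] else []) ++ pick n j ((k + 1) % n) xs

theorem portA_eq (n : Int) (gs : List (List Int)) :
    split_stratified_data n gs
      = (gs.foldl (fun st group =>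
          (PySem.List.pyRange 0 (PySem.List.len group)).foldl
            (fun st i => stepA n st (PySem.List.pyGetD group i 0)) st)
          ((PySem.List.pyRange 0 n).foldl (fun s _ => s ++ [([] : List Int)]) [], 0)).1 := rfl

theorem portB_eq (n : Int) (gs : List (List Int)) :
    split_stratified_data_alt n gs
      = (PySem.List.pyRange 0 n).map (fun i =>
          (PySem.List.enumerate (gs.flatMap (fun group => group))).filterMap (fun px =>
            if PySem.Int.mod px.1 n = i then some px.2 else none)) := rfl

theorem modsucc (k n : Nat) : (k + 1) % n = (k % n + 1) % n :=
  (Nat.add_mod k 1 n).trans (by rw [Nat.add_mod (k % n) 1, Nat.mod_mod])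

theorem keyA (n : Nat) (hn : 0 < n) : ∀ (flat : List Int) (s : List (List Int)) (k : Nat),
    s.length = n → k < n →
    (flat.foldl (stepA (n : Int)) (s, (k : Int))).1
      = (List.range n).map (fun j => s.getD j [] ++ pick n j k flat) := by
  intro flat
  induction flat with
  | nil =>
    intro s k hs hk
    simp only [List.foldl_nil]
    apply List.ext_getElem (by simp [hs])
    intro i h1 h2
    simp only [List.getElem_map, List.getElem_range, pick, List.append_nil]
    rw [List.getD_eq_getElem s [] h1]
  | cons x xs ih =>
    intro s k hs hk
    rw [List.foldl_cons]
    have hstep : stepA (n : Int) (s, (k : Int)) x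
        = (s.modify k (fun l => l ++ [x]), (((k + 1) % n : Nat) : Int)) := by
      unfold stepA
      simp only [Int.toNat_natCast]
      by_cases h : k = n - 1
      · have heq : (k : Int) = (n : Int) - 1 := by omega
        rw [if_pos heq]
        have : (k + 1) % n = 0 := by
          subst h; rw [Nat.sub_add_cancel hn, Nat.mod_self]
        rw [this]; simp
      · have hne : (k : Int) ≠ (n : Int) - 1 := by omega
        rw [if_neg hne]
        have h1 : (k + 1) % n = k + 1 := Nat.mod_eq_of_lt (by omega)
        have h2 : (((k + 1) % n : Nat) : Int) = (k : Int) + 1 := by rw [h1]; push_cast; ring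
        rw [h2]
    rw [hstep, ih (s.modify k (fun l => l ++ [x])) ((k + 1) % n)
        (by simp [hs]) (Nat.mod_lt _ hn)]
    apply List.map_congr_left
    intro j hj
    rw [List.mem_range] at hj
    have hjlen : j < s.length := by omega
    have hmod : (s.modify k (fun l => l ++ [x])).getD j []
        = s.getD j [] ++ (if k = j then [x] else []) := by
      rw [List.getD_eq_getElem _ _ (by simpa using hjlen), List.getElem_modify,
          List.getD_eq_getElem s [] hjlen]
      split_ifs <;> simp
    rw [hmod, pick, List.append_assoc]

theorem keyB (n : Nat) (j : Nat) : ∀ (flat : List Int) (k : Nat),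
    (PySem.List.enumerate flat (k : Int)).filterMap (fun px =>
        if PySem.Int.mod px.1 (n : Int) = (j : Int) then some px.2 else none)
      = pick n j (k % n) flat := by
  intro flat
  induction flat with
  | nil => intro k; rw [PySem.List.enumerate_nil]; rfl
  | cons x xs ih =>
    intro k
    rw [PySem.List.enumerate_cons, List.filterMap_cons]
    have hcast : (k : Int) + 1 = ((k + 1 : Nat) : Int) := by push_cast; omega
    rw [hcast, ih (k + 1)]
    have hmodc : PySem.Int.mod (k : Int) (n : Int) = ((k % n : Nat) : Int) :=
      PySem.Int.mod_natCast k n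
    by_cases h : k % n = j
    · rw [hmodc, if_pos (show ((k % n : Nat) : Int) = (j : Int) by exact_mod_cast h)]
      simp only [pick]
      rw [if_pos h, modsucc k n]
      rfl
    · rw [hmodc, if_neg (show ¬((k % n : Nat) : Int) = (j : Int) by exact_mod_cast h)]
      simp only [pick]
      rw [if_neg h, modsucc k n]
      rfl

-- with all groups empty the double loop is a no-op on the state
theorem foldA_all_nil (n : Int) : ∀ (gs : List (List Int)) (st : List (List Int) × Int),
    (∀ g ∈ gs, g = []) →
    gs.foldl (fun st group =>
      (PySem.List.pyRange 0 (PySem.List.len group)).foldl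
        (fun st i => stepA n st (PySem.List.pyGetD group i 0)) st) st = st := by
  intro gs
  induction gs with
  | nil => intro st _; rfl
  | cons g gs ih =>
    intro st h
    rw [List.foldl_cons, h g (by simp)]
    have hr : PySem.List.pyRange 0 (PySem.List.len ([] : List Int)) = [] := by
      simp [PySem.List.len, PySem.List.pyRange]
    rw [hr, List.foldl_nil]
    exact ih st (fun g hg => h g (by simp [hg]))

theorem pyRange_nonpos (n : Int) (h : n ≤ 0) : PySem.List.pyRange 0 n = [] := by
  simp [PySem.List.pyRange]; omega

theorem split_stratified_data_spec : Claim_equal_split_stratified_data := by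
  intro n gs _ hpre
  unfold Spec_split_stratified_data
  show split_stratified_data n gs = split_stratified_data_alt n gs
  rw [portA_eq, portB_eq]
  by_cases hn : 1 ≤ n
  · obtain ⟨m, hm⟩ : ∃ m : Nat, n = (m : Int) := ⟨n.toNat, (Int.toNat_of_nonneg (by omega)).symm⟩
    have hmpos : 0 < m := by omega
    subst hm
    have hfun : (fun (st : List (List Int) × Int) group =>
          (PySem.List.pyRange 0 (PySem.List.len group)).foldl
            (fun st i => stepA (m : Int) st (PySem.List.pyGetD group i 0)) st)
        = (fun st group => group.foldl (stepA (m : Int)) st) := by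
      funext st g
      have := PySem.List.foldl_pyRange_pyGetD g 0 (stepA (m : Int)) st (le_refl 0)
      simpa using this
    rw [hfun, ← List.foldl_flatMap]
    have hsplits : (PySem.List.pyRange 0 (m : Int)).foldl
        (fun s _ => s ++ [([] : List Int)]) [] = List.replicate m [] := by
      rw [show (fun (s : List (List Int)) (_ : Int) => s ++ [([] : List Int)])
            = (fun acc x => acc ++ [(fun _ => ([] : List Int)) x]) from rfl,
          PySem.List.foldl_append_singleton_eq_map, List.map_const']
      simp [PySem.List.pyRange_zero_natCast]
    rw [hsplits]
    rw [show ((List.replicate m ([] : List Int)), (0 : Int))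
          = ((List.replicate m ([] : List Int)), ((0 : Nat) : Int)) from rfl]
    rw [keyA m hmpos (gs.flatMap (fun group => group)) (List.replicate m []) 0
        List.length_replicate hmpos]
    rw [PySem.List.pyRange_zero_natCast, List.map_map]
    apply List.map_congr_left
    intro j hj
    rw [List.mem_range] at hj
    have hB := keyB m j (gs.flatMap (fun group => group)) 0
    simp only [Nat.cast_zero, Nat.zero_mod] at hB
    simp only [Function.comp_apply]
    rw [hB, List.getD_replicate _ hj, List.nil_append]
  · -- n ≤ 0: Pre_ forces all groups empty; both sides are []
    have hall : ∀ g ∈ gs, g = [] := by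
      rcases hpre with h | h
      · omega
      · exact h
    rw [pyRange_nonpos n (by omega)]
    simp only [List.foldl_nil, List.map_nil]
    rw [foldA_all_nil n gs ([], 0) hall]
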